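-- pv_equiv track=rewrite | github.com/aemaet/ling | retrieval/hw6/test.py | check
-- ===== SOURCE A (Python) =====
-- def check(l1,l2,t):
-- 	res=[0,0,0,0]#tp,fp,fn,tn
-- 	for i in range(len(l1)):
-- 		for j in range(i,len(l2)):
-- 			if l1[i][0] != l2[j][0]: continue
-- 			if l1[i][1] == t*1:
-- 				if l2[j][1] == t*1: res[0]+=1
-- 				else: res[2]+=1
-- 			else:
-- 				if l2[j][1] != t*1: res[3]+=1
-- 				else: res[1]+=1
-- 			break
-- 	for i in range(len(res)):
-- 		if res[i] == 0: res[i] = 1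
-- 	return res
-- ===== SOURCE B (Python) =====
-- def check(l1, l2, t):
--     # One backward pass: maintain a dict mapping key -> value of the FIRST
--     # row of l2 at index >= i, by inserting rows of l2 from the back.
--     first = {}
--     for row in reversed(l2[len(l1):]):
--         first[row[0]] = row[1]
--     res = [0, 0, 0, 0]  # tp, fp, fn, tn
--     for i in reversed(range(len(l1))):
--         if i < len(l2):
--             row = l2[i]
--             first[row[0]] = row[1]
--         key, lab = l1[i][0], l1[i][1]
--         if key in first:
--             v = first[key]
--             if lab == t:
--                 if v == t:
--                     res[0] += 1
--                 else:
--                     res[2] += 1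
--             else:
--                 if v != t:
--                     res[3] += 1
--                 else:
--                     res[1] += 1
--     return [x if x else 1 for x in res]
-- ===== Notes on version B (the rewrite author's own statement) =====
-- stated objective: alternative
-- what changed: Replaced the nested scan (for each i, a linear search of l2[i:] for the first matching key, O(n*m) worst case) by a single backward pass that maintains a dict mapping each key to the value of its first occurrence at index >= i, classifying each l1[i] with one O(1) lookup.
-- outside the precondition, e.g. on check([[1]], [], 0): A returns [1, 1, 1, 1], B raises IndexError; on check([[1]], [[2]], 0): A returns [1, 1, 1, 1], B raises IndexError
import Mathlib
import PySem

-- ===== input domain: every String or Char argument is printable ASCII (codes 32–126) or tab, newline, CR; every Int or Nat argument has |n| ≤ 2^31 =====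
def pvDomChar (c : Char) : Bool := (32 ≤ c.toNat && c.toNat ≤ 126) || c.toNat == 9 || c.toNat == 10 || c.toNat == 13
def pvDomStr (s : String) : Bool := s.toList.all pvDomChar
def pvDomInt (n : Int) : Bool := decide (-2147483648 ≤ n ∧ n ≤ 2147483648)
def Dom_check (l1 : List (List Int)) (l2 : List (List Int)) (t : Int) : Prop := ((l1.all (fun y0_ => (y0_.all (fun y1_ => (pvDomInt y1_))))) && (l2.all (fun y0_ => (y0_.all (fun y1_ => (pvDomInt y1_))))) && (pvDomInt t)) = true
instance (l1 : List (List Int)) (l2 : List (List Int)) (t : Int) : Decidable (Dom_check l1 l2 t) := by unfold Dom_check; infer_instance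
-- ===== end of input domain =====

-- B replaces A's nested scan (for each i a linear search of l2[i:]) by a single backward pass
-- over l2 maintaining a dict key -> value of the first matching row at index >= i.

-- ===== PORT A =====
-- inner loop 'for j in range(i, len(l2)): …' with its break; counters kept as a 4-tuple (tp, fp, fn, tn)
def checkInner (key sec : Int) (l2 : List (List Int)) (t : Int) (res : Int × Int × Int × Int) :
    List Nat → Int × Int × Int × Int
  | [] => res
  | j :: js =>
    let r2 := l2.getD j []
    if r2.getD 0 0 ≠ key then checkInner key sec l2 t res js
    else if sec = t * 1 then
      (if r2.getD 1 0 = t * 1 then (res.1 + 1, res.2.1, res.2.2.1, res.2.2.2)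
       else (res.1, res.2.1, res.2.2.1 + 1, res.2.2.2))
    else
      (if r2.getD 1 0 ≠ t * 1 then (res.1, res.2.1, res.2.2.1, res.2.2.2 + 1)
       else (res.1, res.2.1 + 1, res.2.2.1, res.2.2.2))

-- body of A's outer loop 'for i in range(len(l1))'
def astep (l1 l2 : List (List Int)) (t : Int) (res : Int × Int × Int × Int) (i : Nat) :
    Int × Int × Int × Int :=
  let row := l1.getD i []
  checkInner (row.getD 0 0) (row.getD 1 0) l2 t res (List.range' i (l2.length - i))

def check (l1 : List (List Int)) (l2 : List (List Int)) (t : Int) : List Int :=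
  let res := (List.range l1.length).foldl (astep l1 l2 t)
    ((0 : Int), (0 : Int), (0 : Int), (0 : Int))
  [res.1, res.2.1, res.2.2.1, res.2.2.2].map (fun x => if x = 0 then 1 else x)

-- ===== PORT B =====
-- body of B's loop 'for i in reversed(range(len(l1)))': optionally push row l2[i] into the dict,
-- then classify l1[i] by one dict lookup
def bstep (l1 l2 : List (List Int)) (t : Int)
    (st : PySem.Dict Int Int × Int × Int × Int × Int) (i : Nat) :
    PySem.Dict Int Int × Int × Int × Int × Int :=
  let first := if i < l2.length then
      (let row := l2.getD i []
       st.1.insert (row.getD 0 0) (row.getD 1 0))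
    else st.1
  let row := l1.getD i []
  match first.get? (row.getD 0 0) with
  | none => (first, st.2)
  | some v =>
    let res := st.2
    (first,
      if row.getD 1 0 = t then
        (if v = t then (res.1 + 1, res.2.1, res.2.2.1, res.2.2.2)
         else (res.1, res.2.1, res.2.2.1 + 1, res.2.2.2))
      else
        (if v ≠ t then (res.1, res.2.1, res.2.2.1, res.2.2.2 + 1)
         else (res.1, res.2.1 + 1, res.2.2.1, res.2.2.2)))

def check_alt (l1 : List (List Int)) (l2 : List (List Int)) (t : Int) : List Int :=
  -- 'for row in reversed(l2[len(l1):]): first[row[0]] = row[1]'  (l2[len(l1):] with a nonnegative index = drop)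
  let first0 : PySem.Dict Int Int :=
    ((l2.drop l1.length).reverse).foldl
      (fun d row => d.insert (row.getD 0 0) (row.getD 1 0)) PySem.Dict.empty
  let st := ((List.range l1.length).reverse).foldl (bstep l1 l2 t)
    (first0, ((0 : Int), (0 : Int), (0 : Int), (0 : Int)))
  [st.2.1, st.2.2.1, st.2.2.2.1, st.2.2.2.2].map (fun x => if x = 0 then 1 else x)

-- ===== PRECONDITION & SPEC =====
-- Pre_ excludes inputs containing a row shorter than 2 in l1 or l2: on those Python A raises
-- IndexError whenever it reaches the missing element, and where it does not (the short row is
-- never compared, e.g. l2 is empty or keys never match) A only returns by accident while B,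
-- which indexes every row of l2 once to build its dict, raises IndexError.
def Pre_check (l1 : List (List Int)) (l2 : List (List Int)) (t : Int) : Prop :=
  (∀ r ∈ l1, 2 ≤ r.length) ∧ (∀ r ∈ l2, 2 ≤ r.length)
instance (l1 : List (List Int)) (l2 : List (List Int)) (t : Int) : Decidable (Pre_check l1 l2 t) := by
  unfold Pre_check; infer_instance
def pvWitness_check : List (List Int) × List (List Int) × Int := ([[1, 1], [2, 0]], [[2, 1], [1, 1]], 1)

def Spec_check (l1 : List (List Int)) (l2 : List (List Int)) (t : Int) (out : List Int) : Prop := out = check_alt l1 l2 t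
instance (l1 : List (List Int)) (l2 : List (List Int)) (t : Int) (out : List Int) : Decidable (Spec_check l1 l2 t out) := by unfold Spec_check; infer_instance

-- ===== CLAIM (what is proved, stated in full; the proofs are below) =====
def Claim_equal_check : Prop := ∀ (l1 : List (List Int)) (l2 : List (List Int)) (t : Int), Dom_check l1 l2 t → Pre_check l1 l2 t → Spec_check l1 l2 t (check l1 l2 t)

-- ===== LEMMAS AND PROOFS =====

-- componentwise addition on the 4 counters
def addv (a b : Int × Int × Int × Int) : Int × Int × Int × Int :=
  (a.1 + b.1, a.2.1 + b.2.1, a.2.2.1 + b.2.2.1, a.2.2.2 + b.2.2.2)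

-- classification vector for fixed key/sec, searching l2 from index j on
def vck (l2 : List (List Int)) (t key sec : Int) (j : Nat) : Int × Int × Int × Int :=
  match (l2.drop j).find? (fun r => r[0]?.getD 0 == key) with
  | none => (0, 0, 0, 0)
  | some r =>
    if sec = t then
      (if r[1]?.getD 0 = t then (1, 0, 0, 0) else (0, 0, 1, 0))
    else
      (if r[1]?.getD 0 = t then (0, 1, 0, 0) else (0, 0, 0, 1))

-- classification vector contributed by index i
def vc (l1 l2 : List (List Int)) (t : Int) (i : Nat) : Int × Int × Int × Int :=
  vck l2 t ((l1[i]?.getD [])[0]?.getD 0) ((l1[i]?.getD [])[1]?.getD 0) i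

-- total contribution of indices 0..m-1
def Sv (l1 l2 : List (List Int)) (t : Int) : Nat → Int × Int × Int × Int
  | 0 => (0, 0, 0, 0)
  | m + 1 => addv (Sv l1 l2 t m) (vc l1 l2 t m)

-- first-occurrence map of a row list, built by inserting from the back
def FMap : List (List Int) → PySem.Dict Int Int
  | [] => PySem.Dict.empty
  | r :: rs => (FMap rs).insert (r[0]?.getD 0) (r[1]?.getD 0)

theorem addv_zero (a : Int × Int × Int × Int) : addv a (0, 0, 0, 0) = a := by
  simp [addv]

theorem addv_swap (s b c : Int × Int × Int × Int) :
    addv (addv s b) c = addv s (addv c b) := by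
  simp only [addv, Prod.mk.injEq]
  omega

theorem FMap_get? (rs : List (List Int)) (k : Int) :
    (FMap rs).get? k = (rs.find? (fun r => r[0]?.getD 0 == k)).map (fun r => r[1]?.getD 0) := by
  induction rs with
  | nil => simp [FMap, PySem.Dict.get?_empty]
  | cons r rs ih =>
    simp only [FMap, List.find?_cons]
    rw [PySem.Dict.get?_insert]
    by_cases h : r[0]?.getD 0 = k
    · simp [h]
    · have hb : (r[0]?.getD 0 == k) = false := by simp [h]
      simp [hb, ih, Ne.symm h]

theorem init_FMap (rs : List (List Int)) :
    (rs.reverse).foldl (fun d row => d.insert (row.getD 0 0) (row.getD 1 0)) PySem.Dict.empty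
      = FMap rs := by
  induction rs with
  | nil => simp [FMap]
  | cons r rs ih =>
    rw [List.reverse_cons, List.foldl_append, ih]
    rfl

-- A's inner loop computes exactly vck
theorem inner_eq (l2 : List (List Int)) (t key sec : Int) :
    ∀ (n j : Nat), l2.length - j = n → ∀ res,
      checkInner key sec l2 t res (List.range' j n) = addv res (vck l2 t key sec j) := by
  intro n
  induction n with
  | zero =>
    intro j h res
    have hge : l2.length ≤ j := by omega
    simp [List.range', checkInner, vck, List.drop_eq_nil_of_le hge, addv_zero]
  | succ n ih =>
    intro j h res
    have hj : j < l2.length := by omega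
    have hdrop : l2.drop j = l2[j] :: l2.drop (j + 1) := List.drop_eq_getElem_cons hj
    have hgetD : l2.getD j [] = l2[j] := List.getD_eq_getElem l2 [] hj
    simp only [List.getD] at hgetD
    rw [List.range'_succ]
    by_cases hk : l2[j][0]?.getD 0 = key
    · -- key matches: classify and break
      have hfind : (l2.drop j).find? (fun r => r[0]?.getD 0 == key) = some l2[j] := by
        rw [hdrop, List.find?_cons_of_pos]; simp [hk]
      simp only [vck, hfind]
      by_cases h1 : sec = t <;> by_cases h2 : l2[j][1]?.getD 0 = t <;>
        simp [checkInner, List.getD, hgetD, hk, h1, h2, mul_one, addv]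
    · -- key differs: continue with j+1
      have hstep : checkInner key sec l2 t res (j :: List.range' (j + 1) n)
          = checkInner key sec l2 t res (List.range' (j + 1) n) := by
        simp [checkInner, List.getD, hgetD, hk]
      have hvck : vck l2 t key sec j = vck l2 t key sec (j + 1) := by
        have hf : (l2.drop j).find? (fun r => r[0]?.getD 0 == key)
            = (l2.drop (j + 1)).find? (fun r => r[0]?.getD 0 == key) := by
          rw [hdrop, List.find?_cons_of_neg]; simp [hk]
        simp only [vck, hf]
      rw [hstep, ih (j + 1) (by omega) res, hvck]

theorem astep_eq (l1 l2 : List (List Int)) (t : Int) (res : Int × Int × Int × Int) (i : Nat) :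
    astep l1 l2 t res i = addv res (vc l1 l2 t i) := by
  simp only [astep, List.getD]
  exact inner_eq l2 t _ _ (l2.length - i) i rfl res

-- A's outer loop sums the vc's
theorem A_sum (l1 l2 : List (List Int)) (t : Int) :
    ∀ (m : Nat) (res : Int × Int × Int × Int),
      (List.range m).foldl (astep l1 l2 t) res = addv res (Sv l1 l2 t m) := by
  intro m
  induction m with
  | zero => intro res; simp [Sv, addv_zero]
  | succ m ih =>
    intro res
    rw [List.range_succ, List.foldl_append]
    simp only [List.foldl_cons, List.foldl_nil]
    rw [ih res, astep_eq]
    show addv (addv res (Sv l1 l2 t m)) (vc l1 l2 t m) = addv res (Sv l1 l2 t (m + 1))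
    rw [addv_swap]
    simp only [Sv, addv, Prod.mk.injEq]
    omega

-- one step of B's loop: the dict advances from FMap (drop (i+1)) to FMap (drop i),
-- and the counters gain vc i
theorem bstep_eq (l1 l2 : List (List Int)) (t : Int) (i : Nat) (s : Int × Int × Int × Int) :
    bstep l1 l2 t (FMap (l2.drop (i + 1)), s) i = (FMap (l2.drop i), addv s (vc l1 l2 t i)) := by
  have hd : (if i < l2.length then
        (FMap (l2.drop (i + 1))).insert ((l2[i]?.getD [])[0]?.getD 0) ((l2[i]?.getD [])[1]?.getD 0)
      else FMap (l2.drop (i + 1))) = FMap (l2.drop i) := by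
    by_cases hi : i < l2.length
    · have hg : l2[i]?.getD [] = l2[i] := by simp [List.getElem?_eq_getElem hi]
      rw [if_pos hi, hg, List.drop_eq_getElem_cons hi]
      rfl
    · rw [if_neg hi, List.drop_eq_nil_of_le (by omega), List.drop_eq_nil_of_le (by omega)]
  simp only [bstep, List.getD]
  rw [hd, FMap_get?]
  rcases hf : (l2.drop i).find? (fun r => r[0]?.getD 0 == (l1[i]?.getD [])[0]?.getD 0) with _ | r
  · simp [hf, vc, vck, addv_zero]
  · by_cases h1 : (l1[i]?.getD [])[1]?.getD 0 = t <;> by_cases h2 : r[1]?.getD 0 = t <;>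
      simp [hf, vc, vck, h1, h2, addv]

-- B's loop, started with the dict of the suffix, sums the vc's (counters component)
theorem B_sum (l1 l2 : List (List Int)) (t : Int) :
    ∀ (m : Nat) (s : Int × Int × Int × Int),
      (((List.range m).reverse).foldl (bstep l1 l2 t) (FMap (l2.drop m), s)).2
        = addv s (Sv l1 l2 t m) := by
  intro m
  induction m with
  | zero => intro s; simp [Sv, addv_zero]
  | succ m ih =>
    intro s
    rw [List.range_succ, List.reverse_append]
    simp only [List.reverse_cons, List.reverse_nil, List.nil_append, List.cons_append,
      List.foldl_cons]
    rw [bstep_eq l1 l2 t m s, ih (addv s (vc l1 l2 t m)), addv_swap]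
    rfl

-- ===== VERDICT (by name: the statement is the Claim_ definition above) =====
theorem check_spec : Claim_equal_check := by
  intro l1 l2 t _ _
  show check l1 l2 t = check_alt l1 l2 t
  simp only [check, check_alt, init_FMap, A_sum l1 l2 t l1.length, B_sum l1 l2 t l1.length]
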